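-- pv_equiv track=rewrite | github.com/LeGrosLezard/S-Y-N-E-R-G-O | pounties/picture_treatment/points_recontruction/recuperate_points_to_search.py | identify_phaxs_points
-- ===== SOURCE A (Python) =====
-- def identify_phaxs_points(points):
--     """We need to identify points presents or not
--     if one point's is egal to ((0, 0), (0, 0))
--     don't recuperate index into the list.
--
--     form is like a dictionnary:
--     t : {((1, 1),(1, 1)), ((2, 2), (2, 2)), ((0, 0), (0, 0))}
--     we recupera index 0 and 1, index 2 is none point.
--     In case there are no points into the finger or all points
--     into the finger don't
--     search it in this part.
--     """
--
--     to_delete = []  #Phax to delete from points.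
--     finger = []
--     for k, v in points.items():
--
--         c = 0 #None points
--
--         for i in v: #None points += 1
--             if i == ((0, 0), (0, 0)):
--                 c += 1
--
--         if c == len(v): #All points is None so we have no points
--             finger.append(k)
--             to_delete.append(k)
--
--         elif c == 0: #One points is None
--             to_delete.append(k)
--
--     """This dictionnary is phax missing to search"""
--     phax = {"t" : [],  "i" : [],  "m" :[], "an" : [], "a" : []}
--
--     for k, v in points.items():
--         nan = False
--
--         for i in to_delete: #No points into the finger
--             if k == i:
--                 nan = True
--
--         if nan is False: #There are max one none
--             phax[k] = v
--
--     return phax, finger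
-- ===== SOURCE B (Python) =====
-- def identify_phaxs_points(points):
--     """Single fused pass over points.items(); no to_delete list, no second
--     membership scan."""
--     phax = {"t": [], "i": [], "m": [], "an": [], "a": []}
--     finger = []
--     for k, v in points.items():
--         c = v.count(((0, 0), (0, 0)))
--         if c == len(v):
--             finger.append(k)
--         elif c != 0:
--             phax[k] = v
--     return phax, finger
-- ===== Notes on version B (the rewrite author's own statement) =====
-- stated objective: faster
-- what changed: B replaces A's two passes over the dict (one building a to_delete list plus a per-key linear membership scan of it, then a second pass copying the survivors) by one fused pass that classifies each key directly from its none-point count, dropping to_delete entirely; the inner counting loop becomes list.count.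
import Mathlib
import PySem

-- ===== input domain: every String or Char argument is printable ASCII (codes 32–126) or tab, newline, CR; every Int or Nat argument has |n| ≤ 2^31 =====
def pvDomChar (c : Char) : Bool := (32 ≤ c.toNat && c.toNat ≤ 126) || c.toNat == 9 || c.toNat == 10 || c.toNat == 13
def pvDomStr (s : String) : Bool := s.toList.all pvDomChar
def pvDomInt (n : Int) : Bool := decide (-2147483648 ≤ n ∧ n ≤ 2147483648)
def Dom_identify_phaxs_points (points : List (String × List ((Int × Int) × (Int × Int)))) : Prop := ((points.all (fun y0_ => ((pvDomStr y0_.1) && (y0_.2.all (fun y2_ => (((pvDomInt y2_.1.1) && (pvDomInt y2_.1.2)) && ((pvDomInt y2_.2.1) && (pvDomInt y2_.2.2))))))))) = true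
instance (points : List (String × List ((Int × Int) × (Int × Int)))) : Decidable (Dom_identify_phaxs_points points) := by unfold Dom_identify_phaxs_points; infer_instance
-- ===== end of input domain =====

-- B fuses A's two passes over the dict into one pass that classifies each key by
-- its none-point count, dropping the to_delete list and its membership scan.
-- Equivalence is about the RETURN value; neither version mutates its argument.

def pvNonePt : (Int × Int) × (Int × Int) := ((0, 0), (0, 0))

abbrev pvRow : Type := String × List ((Int × Int) × (Int × Int))

-- ===== PORT A =====
-- A's inner counting loop: 'c = 0; for i in v: if i == ((0,0),(0,0)): c += 1'
def pvAcount (v : List ((Int × Int) × (Int × Int))) : Int :=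
  v.foldl (fun c i => if i == pvNonePt then c + 1 else c) 0

-- A's first loop over points.items(), carrying (to_delete, finger)
def pvAloop1 (acc : List String × List String) : List pvRow → List String × List String
  | [] => acc
  | kv :: rest =>
    let c := pvAcount kv.2
    pvAloop1
      (if c = (kv.2.length : Int) then (acc.1 ++ [kv.1], acc.2 ++ [kv.1])
       else if c = 0 then (acc.1 ++ [kv.1], acc.2)
       else acc) rest

-- A's inner membership loop: 'nan = False; for i in to_delete: if k == i: nan = True'
def pvAnan (k : String) (nan : Bool) : List String → Bool
  | [] => nan
  | i :: rest => pvAnan k (if k == i then true else nan) rest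

-- A's second loop over points.items(), filling phax
def pvAloop2 (td : List String) (ph : PySem.Dict String (List ((Int × Int) × (Int × Int)))) :
    List pvRow → PySem.Dict String (List ((Int × Int) × (Int × Int)))
  | [] => ph
  | kv :: rest =>
    pvAloop2 td (if pvAnan kv.1 false td = false then ph.insert kv.1 kv.2 else ph) rest

def identify_phaxs_points (points : List (String × List ((Int × Int) × (Int × Int)))) : (List (String × List ((Int × Int) × (Int × Int)))) × List String :=
  let tdfg := pvAloop1 ([], []) points
  let phax := pvAloop2 tdfg.1
    (PySem.Dict.mk [("t", []), ("i", []), ("m", []), ("an", []), ("a", [])]) points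
  (phax.items, tdfg.2)

-- ===== PORT B =====
-- B's single fused loop, carrying (phax, finger)
def pvBloop (acc : PySem.Dict String (List ((Int × Int) × (Int × Int))) × List String) :
    List pvRow → PySem.Dict String (List ((Int × Int) × (Int × Int))) × List String
  | [] => acc
  | kv :: rest =>
    let c := PySem.List.count kv.2 pvNonePt
    pvBloop
      (if c = kv.2.length then (acc.1, acc.2 ++ [kv.1])
       else if c ≠ 0 then (acc.1.insert kv.1 kv.2, acc.2)
       else acc) rest

def identify_phaxs_points_alt (points : List (String × List ((Int × Int) × (Int × Int)))) : (List (String × List ((Int × Int) × (Int × Int)))) × List String :=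
  let r := pvBloop
    (PySem.Dict.mk [("t", []), ("i", []), ("m", []), ("an", []), ("a", [])], []) points
  (r.1.items, r.2)

-- ===== PRECONDITION & SPEC =====
-- Pre_ excludes association lists with duplicate keys: they do not represent a
-- Python dict, which is the type A is called with.
def Pre_identify_phaxs_points (points : List (String × List ((Int × Int) × (Int × Int)))) : Prop :=
  (points.map Prod.fst).Nodup
instance (points : List (String × List ((Int × Int) × (Int × Int)))) : Decidable (Pre_identify_phaxs_points points) := by unfold Pre_identify_phaxs_points; infer_instance

def pvWitness_identify_phaxs_points : (List (String × List ((Int × Int) × (Int × Int)))) :=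
  [("t", [((0, 0), (0, 0)), ((1, 1), (1, 1))]), ("i", [((0, 0), (0, 0))]), ("x", [((2, 2), (3, 3))])]

def Spec_identify_phaxs_points (points : List (String × List ((Int × Int) × (Int × Int)))) (out : (List (String × List ((Int × Int) × (Int × Int)))) × List String) : Prop := out = identify_phaxs_points_alt points
instance (points : List (String × List ((Int × Int) × (Int × Int)))) (out : (List (String × List ((Int × Int) × (Int × Int)))) × List String) : Decidable (Spec_identify_phaxs_points points out) := by unfold Spec_identify_phaxs_points; infer_instance

-- ===== CLAIM (what is proved, stated in full; the proofs are below) =====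
def Claim_equal_identify_phaxs_points : Prop := ∀ (points : List (String × List ((Int × Int) × (Int × Int)))), Dom_identify_phaxs_points points → Pre_identify_phaxs_points points → Spec_identify_phaxs_points points (identify_phaxs_points points)

-- ===== LEMMAS AND PROOFS =====

-- predicates used only by the proofs: 'to delete' and 'all-none' rows
def pvDel (kv : pvRow) : Bool := (kv.2.count pvNonePt == kv.2.length) || (kv.2.count pvNonePt == 0)
def pvFin (kv : pvRow) : Bool := kv.2.count pvNonePt == kv.2.length

-- the common phax-filling loop both sides reduce to
def pvPhloop (ph : PySem.Dict String (List ((Int × Int) × (Int × Int)))) :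
    List pvRow → PySem.Dict String (List ((Int × Int) × (Int × Int)))
  | [] => ph
  | kv :: rest => pvPhloop (if pvDel kv then ph else ph.insert kv.1 kv.2) rest

theorem pvAcount_eq (v : List ((Int × Int) × (Int × Int))) :
    pvAcount v = (v.count pvNonePt : Int) := by
  simpa [pvAcount] using PySem.List.foldl_beq_add_one (l := v) (v := pvNonePt) (a := (0 : Int))

-- A's first loop produces exactly the filtered key lists
theorem pvFold1 (points : List pvRow) : ∀ td fg : List String,
    pvAloop1 (td, fg) points
    = (td ++ (points.filter pvDel).map Prod.fst, fg ++ (points.filter pvFin).map Prod.fst) := by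
  induction points with
  | nil => simp [pvAloop1]
  | cons kv rest ih =>
    intro td fg
    rw [pvAloop1, List.filter_cons, List.filter_cons]
    rw [pvAcount_eq]
    by_cases h1 : kv.2.count pvNonePt = kv.2.length
    · have hd : pvDel kv = true := by simp [pvDel, h1]
      have hf : pvFin kv = true := by simp [pvFin, h1]
      simp [h1, hd, hf, ih]
    · have hcc : ¬ ((kv.2.count pvNonePt : Int) = (kv.2.length : Int)) := by
        intro h; exact h1 (by exact_mod_cast h)
      have hf : pvFin kv = false := by simp [pvFin, h1]
      by_cases h0 : kv.2.count pvNonePt = 0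
      · have hd : pvDel kv = true := by simp [pvDel, h0]
        have hc0 : (kv.2.count pvNonePt : Int) = 0 := by exact_mod_cast h0
        have hlen : ¬ ((0 : Int) = (kv.2.length : Int)) := by
          intro h
          exact h1 (h0.trans (by exact_mod_cast h))
        simp [hcc, hc0, hlen, hd, hf, ih]
      · have hd : pvDel kv = false := by simp [pvDel, h1, h0]
        have hc0 : ¬ ((kv.2.count pvNonePt : Int) = 0) := by
          intro h; exact h0 (by exact_mod_cast h)
        simp [hcc, hc0, h0, h1, hd, hf, ih]

-- A's inner membership loop is list membership
theorem pvNanFold (k : String) (td : List String) : ∀ b : Bool,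
    pvAnan k b td = (b || decide (k ∈ td)) := by
  induction td with
  | nil => simp [pvAnan]
  | cons i rest ih =>
    intro b
    by_cases h : k = i
    · subst h
      simp [pvAnan, ih]
    · simp [pvAnan, h, ih, Ne.symm h]

-- with distinct keys, membership of k in the filtered key list is the predicate at its row
theorem pvMemFilter (p : pvRow → Bool) (points : List pvRow)
    (h : (points.map Prod.fst).Nodup) (kv : pvRow) (hm : kv ∈ points) :
    (kv.1 ∈ (points.filter p).map Prod.fst) ↔ p kv = true := by
  constructor
  · intro hk
    rcases List.mem_map.1 hk with ⟨kv', hkv', hfst⟩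
    have hkv'p : kv' ∈ points := (List.mem_filter.1 hkv').1
    have : kv' = kv := List.inj_on_of_nodup_map h hkv'p hm hfst
    exact this ▸ (List.mem_filter.1 hkv').2
  · intro hp
    exact List.mem_map.2 ⟨kv, List.mem_filter.2 ⟨hm, hp⟩, rfl⟩

-- A's second loop, with td deciding exactly pvDel on its rows, is pvPhloop
theorem pvFold2 (td : List String) : ∀ (points : List pvRow),
    (∀ kv ∈ points, (decide (kv.1 ∈ td) = pvDel kv)) →
    ∀ ph, pvAloop2 td ph points = pvPhloop ph points := by
  intro points
  induction points with
  | nil => intro _ ph; simp [pvAloop2, pvPhloop]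
  | cons kv rest ih =>
    intro hmem ph
    rw [pvAloop2, pvPhloop, pvNanFold]
    have hkv := hmem kv (by simp)
    by_cases hd : pvDel kv = true
    · rw [hd] at hkv
      simp only [Bool.false_or, hkv, hd]
      simp [ih (fun kv h => hmem kv (by simp [h]))]
    · have hd' : pvDel kv = false := by simpa using hd
      rw [hd'] at hkv
      simp only [Bool.false_or, hkv, hd']
      simp [ih (fun kv h => hmem kv (by simp [h]))]

-- B's fused loop splits into pvPhloop and the finger keys
theorem pvFoldB (points : List pvRow) :
    ∀ (ph : PySem.Dict String (List ((Int × Int) × (Int × Int)))) (fg : List String),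
    pvBloop (ph, fg) points
    = (pvPhloop ph points, fg ++ (points.filter pvFin).map Prod.fst) := by
  induction points with
  | nil => simp [pvBloop, pvPhloop]
  | cons kv rest ih =>
    intro ph fg
    rw [pvBloop, pvPhloop, List.filter_cons]
    by_cases h1 : List.count pvNonePt kv.2 = kv.2.length
    · have hd : pvDel kv = true := by simp [pvDel, h1]
      have hf : pvFin kv = true := by simp [pvFin, h1]
      simp [h1, hd, hf, ih]
    · have hf : pvFin kv = false := by simp [pvFin, h1]
      by_cases h0 : List.count pvNonePt kv.2 = 0
      · have hd : pvDel kv = true := by simp [pvDel, h0]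
        have hlen : ¬ (0 = kv.2.length) := fun h => h1 (h0.trans h)
        simp [h1, h0, hlen, hd, hf, ih]
      · have hd : pvDel kv = false := by simp [pvDel, h1, h0]
        simp [h1, h0, hd, hf, ih]

-- ===== VERDICT (by name: the statement is the Claim_ definition above) =====
theorem identify_phaxs_points_spec : Claim_equal_identify_phaxs_points := by
  intro points _ hpre
  unfold Spec_identify_phaxs_points identify_phaxs_points identify_phaxs_points_alt
  rw [pvFold1 points [] [], pvFoldB points]
  simp only [List.nil_append]
  congr 2
  apply pvFold2
  intro kv hmem
  have hiff := pvMemFilter pvDel points hpre kv hmem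
  by_cases hd : pvDel kv = true
  · simp [hd, hiff.2 hd]
  · have hnot : kv.1 ∉ (points.filter pvDel).map Prod.fst := fun hk => hd (hiff.1 hk)
    simp [hnot, hd]
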